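-- pv_equiv track=rewrite | github.com/RomanOvc/lab2.2 | laba3.py | bust
-- ===== SOURCE A (Python) =====
-- def bust(str1):
--     list_33_39 = []
--     list_48_57 = []
--     list_65_90 = []
--     list_97_122 = []
--     check = 0
--     for st in str1:
--         if ord(st) >= 33 and ord(st) <= 39:
--             list_33_39.append(st)
--         elif ord(st) >= 48 and ord(st) <= 57:
--             list_48_57.append(st)
--         elif ord(st) >= 65 and ord(st) <= 90:
--             list_65_90.append(st)
--         elif ord(st) >= 97 and ord(st) <= 122:
--             list_97_122.append(st)
--     if len(list_33_39) >= 1: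
--         check += 7
--     if len(list_48_57) >= 1:
--         check += 10
--     if len(list_65_90) >= 1:
--         check += 26
--     if len(list_97_122) >= 1:
--         check += 26
--     return check
-- ===== SOURCE B (Python) =====
-- def bust(str1):
--     return (
--         (7 if any(33 <= ord(c) <= 39 for c in str1) else 0)
--         + (10 if any(48 <= ord(c) <= 57 for c in str1) else 0)
--         + (26 if any(65 <= ord(c) <= 90 for c in str1) else 0)
--         + (26 if any(97 <= ord(c) <= 122 for c in str1) else 0)
--     )
-- ===== Notes on version B (the rewrite author's own statement) =====
-- stated objective: idiomatic
-- what changed: Replaces the single elif loop that accumulates four character lists with four independent short-circuiting any() presence scans summed directly (disjoint ranges make this exact).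
import Mathlib
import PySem

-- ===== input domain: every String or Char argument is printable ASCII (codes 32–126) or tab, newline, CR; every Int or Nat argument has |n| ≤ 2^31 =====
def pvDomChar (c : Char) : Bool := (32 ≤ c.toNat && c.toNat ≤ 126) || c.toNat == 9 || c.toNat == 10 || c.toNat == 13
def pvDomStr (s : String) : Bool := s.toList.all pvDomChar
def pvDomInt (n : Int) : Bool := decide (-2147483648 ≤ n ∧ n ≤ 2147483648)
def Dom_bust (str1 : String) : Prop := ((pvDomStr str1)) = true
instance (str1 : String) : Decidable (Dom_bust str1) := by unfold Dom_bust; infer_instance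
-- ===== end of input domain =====

-- B replaces A's single elif loop filling four lists by four independent any-scans summed directly.

-- ===== PORT A =====
-- state: the four accumulator lists, in A's order
def bustStep (acc : List Char × List Char × List Char × List Char) (st : Char) :
    List Char × List Char × List Char × List Char :=
  if 33 ≤ st.toNat && st.toNat ≤ 39 then (acc.1 ++ [st], acc.2.1, acc.2.2.1, acc.2.2.2)
  else if 48 ≤ st.toNat && st.toNat ≤ 57 then (acc.1, acc.2.1 ++ [st], acc.2.2.1, acc.2.2.2)
  else if 65 ≤ st.toNat && st.toNat ≤ 90 then (acc.1, acc.2.1, acc.2.2.1 ++ [st], acc.2.2.2)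
  else if 97 ≤ st.toNat && st.toNat ≤ 122 then (acc.1, acc.2.1, acc.2.2.1, acc.2.2.2 ++ [st])
  else acc

def bust (str1 : String) : Int :=
  let s := str1.toList.foldl bustStep ([], [], [], [])
  let check : Int := 0
  let check := if s.1.length ≥ 1 then check + 7 else check
  let check := if s.2.1.length ≥ 1 then check + 10 else check
  let check := if s.2.2.1.length ≥ 1 then check + 26 else check
  let check := if s.2.2.2.length ≥ 1 then check + 26 else check
  check

-- ===== PORT B =====
def bust_alt (str1 : String) : Int :=
  (if str1.toList.any (fun c => 33 ≤ c.toNat && c.toNat ≤ 39) then 7 else 0)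
  + (if str1.toList.any (fun c => 48 ≤ c.toNat && c.toNat ≤ 57) then 10 else 0)
  + (if str1.toList.any (fun c => 65 ≤ c.toNat && c.toNat ≤ 90) then 26 else 0)
  + (if str1.toList.any (fun c => 97 ≤ c.toNat && c.toNat ≤ 122) then 26 else 0)

-- ===== PRECONDITION & SPEC =====
def Spec_bust (str1 : String) (out : Int) : Prop := out = bust_alt str1
instance (str1 : String) (out : Int) : Decidable (Spec_bust str1 out) := by unfold Spec_bust; infer_instance

-- ===== CLAIM (what is proved, stated in full; the proofs are below) =====
def Claim_equal_bust : Prop := ∀ (str1 : String), Dom_bust str1 → Spec_bust str1 (bust str1)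

-- ===== LEMMAS AND PROOFS =====

def q1 (c : Char) : Bool := 33 ≤ c.toNat && c.toNat ≤ 39
def q2 (c : Char) : Bool := !q1 c && (48 ≤ c.toNat && c.toNat ≤ 57)
def q3 (c : Char) : Bool := !q1 c && !(48 ≤ c.toNat && c.toNat ≤ 57) && (65 ≤ c.toNat && c.toNat ≤ 90)
def q4 (c : Char) : Bool := !q1 c && !(48 ≤ c.toNat && c.toNat ≤ 57) && !(65 ≤ c.toNat && c.toNat ≤ 90) && (97 ≤ c.toNat && c.toNat ≤ 122)

theorem bust_fold_spec (l : List Char) (a b c d : List Char) :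
    l.foldl bustStep (a, b, c, d) =
      (a ++ l.filter q1, b ++ l.filter q2, c ++ l.filter q3, d ++ l.filter q4) := by
  induction l generalizing a b c d with
  | nil => simp
  | cons x xs ih =>
    simp only [List.foldl_cons, List.filter_cons]
    cases hb1 : (33 ≤ x.toNat && x.toNat ≤ 39) <;>
    cases hb2 : (48 ≤ x.toNat && x.toNat ≤ 57) <;>
    cases hb3 : (65 ≤ x.toNat && x.toNat ≤ 90) <;>
    cases hb4 : (97 ≤ x.toNat && x.toNat ≤ 122) <;>
      simp [bustStep, ih, q1, q2, q3, q4, hb1, hb2, hb3, hb4]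

theorem bust_spec_aux (str1 : String) : bust str1 = bust_alt str1 := by
  have gen : ∀ (q p : Char → Bool), (∀ c, q c = true ↔ p c = true) →
      ((List.filter q str1.toList).length ≥ 1 ↔ str1.toList.any p = true) := by
    intro q p hq
    simp only [ge_iff_le, Nat.one_le_iff_ne_zero, ne_eq, List.length_eq_zero_iff,
      List.filter_eq_nil_iff, List.any_eq_true]
    push Not
    simp [hq]
  have g1 := gen q1 (fun c => 33 ≤ c.toNat && c.toNat ≤ 39) (by intro c; simp [q1])
  have g2 := gen q2 (fun c => 48 ≤ c.toNat && c.toNat ≤ 57) (by intro c; simp [q1, q2]; omega)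
  have g3 := gen q3 (fun c => 65 ≤ c.toNat && c.toNat ≤ 90) (by intro c; simp [q1, q3]; omega)
  have g4 := gen q4 (fun c => 97 ≤ c.toNat && c.toNat ≤ 122) (by intro c; simp [q1, q4]; omega)
  unfold bust bust_alt
  rw [bust_fold_spec]
  simp only [List.nil_append, g1, g2, g3, g4]
  split_ifs <;> norm_num

-- ===== VERDICT (by name: the statement is the Claim_ definition above) =====
theorem bust_spec : Claim_equal_bust := by
  intro str1 _
  exact bust_spec_aux str1
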